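-- pv_equiv track=rewrite | github.com/chardetm/altered-scripts | get_cards_data.py | merge_language_dicts
-- ===== SOURCE A (Python) =====
-- from typing import Dict, List
--
-- def merge_language_dicts(data: Dict[str, Dict[str, any]]):
--     merged_dict = {}
--     for language in data:
--         for key in data[language]:
--             if key not in merged_dict:
--                 merged_dict[key] = {}
--             merged_dict[key][language] = data[language][key]
--     return merged_dict
-- ===== SOURCE B (Python) =====
-- def merge_language_dicts(data):
--     keys = dict.fromkeys(key for inner in data.values() for key in inner)
--     return {
--         key: {lang: data[lang][key] for lang in data if key in data[lang]}
--         for key in keys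
--     }
-- ===== Notes on version B (the rewrite author's own statement) =====
-- stated objective: simpler
-- what changed: A does one pass per language inserting each entry into a growing dict-of-dicts; B first collects all inner keys in first-encounter order with dict.fromkeys and then builds the transposed result with two comprehensions, looping outer over output keys and inner over languages with a membership test.
import Mathlib
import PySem

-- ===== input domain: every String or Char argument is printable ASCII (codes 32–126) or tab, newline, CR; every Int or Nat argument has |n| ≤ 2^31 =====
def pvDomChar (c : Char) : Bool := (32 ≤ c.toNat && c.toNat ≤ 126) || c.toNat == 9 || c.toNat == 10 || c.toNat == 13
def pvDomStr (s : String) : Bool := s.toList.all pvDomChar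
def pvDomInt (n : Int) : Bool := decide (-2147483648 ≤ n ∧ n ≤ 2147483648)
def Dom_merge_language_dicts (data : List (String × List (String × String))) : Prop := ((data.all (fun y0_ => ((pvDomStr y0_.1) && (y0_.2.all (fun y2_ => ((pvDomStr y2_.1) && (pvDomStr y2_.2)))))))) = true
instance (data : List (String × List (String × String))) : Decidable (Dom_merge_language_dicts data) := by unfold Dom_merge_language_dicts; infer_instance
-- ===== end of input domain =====

-- B transposes the language-keyed dict with dict.fromkeys + two comprehensions instead of
-- A's per-language insertion pass; objective: simpler (no speed claim).

-- ===== PORT A =====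
-- one Python loop body: 'if key not in merged_dict: merged_dict[key] = {}' then
-- 'merged_dict[key][language] = data[language][key]' (under Pre_ the inner dicts have unique
-- keys, so data[language][key] is the value paired with key in the entry being iterated)
def pvInsertEntry (merged : PySem.Dict String (List (String × String))) (language : String)
    (kv : String × String) : PySem.Dict String (List (String × String)) :=
  let merged := if merged.contains kv.1 then merged else merged.insert kv.1 []
  merged.modify kv.1 [] (fun d => (PySem.Dict.insert ⟨d⟩ language kv.2).items)

def merge_language_dicts (data : List (String × List (String × String))) : List (String × List (String × String)) :=
  (data.foldl (fun merged p => p.2.foldl (fun m kv => pvInsertEntry m p.1 kv) merged)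
    PySem.Dict.empty).items

-- ===== PORT B =====
def merge_language_dicts_alt (data : List (String × List (String × String))) : List (String × List (String × String)) :=
  let keys := PySem.List.dedup (data.flatMap (fun p => p.2.map Prod.fst))
  keys.map (fun key =>
    (key, data.filterMap (fun p => ((PySem.Dict.mk p.2).get? key).map (fun v => (p.1, v)))))

-- ===== PRECONDITION & SPEC =====
-- Pre_ excludes only association lists with a duplicated outer key or a duplicated key inside
-- an inner list: such lists do not represent Python dicts (Python's dict input always satisfies
-- Pre_), and on them the two ports' accidental duplicate handling differs.
def Pre_merge_language_dicts (data : List (String × List (String × String))) : Prop :=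
  (data.map Prod.fst).Nodup ∧ ∀ p ∈ data, (p.2.map Prod.fst).Nodup
instance (data : List (String × List (String × String))) : Decidable (Pre_merge_language_dicts data) := by unfold Pre_merge_language_dicts; infer_instance
def pvWitness_merge_language_dicts : (List (String × List (String × String))) :=
  [("en", [("a", "1"), ("b", "2")]), ("fr", [("a", "3")])]
def Spec_merge_language_dicts (data : List (String × List (String × String))) (out : List (String × List (String × String))) : Prop := out = merge_language_dicts_alt data
instance (data : List (String × List (String × String))) (out : List (String × List (String × String))) : Decidable (Spec_merge_language_dicts data out) := by unfold Spec_merge_language_dicts; infer_instance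

-- ===== CLAIM (what is proved, stated in full; the proofs are below) =====
def Claim_equal_merge_language_dicts : Prop := ∀ (data : List (String × List (String × String))), Dom_merge_language_dicts data → Pre_merge_language_dicts data → Spec_merge_language_dicts data (merge_language_dicts data)

-- ===== LEMMAS AND PROOFS =====

-- the inner dict B builds for one key restricted to one language entry
def pvOpt (lang : String) (inner : List (String × String)) (k : String) : List (String × String) :=
  (((PySem.Dict.mk inner).get? k).map (fun v => (lang, v))).toList

-- the inner dict B builds for key k
def pvCollect (data : List (String × List (String × String))) (k : String) : List (String × String) :=
  data.filterMap (fun p => ((PySem.Dict.mk p.2).get? k).map (fun v => (p.1, v)))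

-- dedup of a key stream l relative to already-present keys ks, with accumulator acc
def pvNewK (ks acc l : List String) : List String :=
  l.foldl (fun acc k => if k ∈ ks ∨ k ∈ acc then acc else acc ++ [k]) acc

theorem pvCollect_cons (lang : String) (inner : List (String × String))
    (rest : List (String × List (String × String))) (k : String) :
    pvCollect ((lang, inner) :: rest) k = pvOpt lang inner k ++ pvCollect rest k := by
  simp only [pvCollect, pvOpt, List.filterMap_cons]
  cases h : (PySem.Dict.mk inner).get? k <;> simp

theorem pvOpt_eq_nil (lang : String) (inner : List (String × String)) (k : String)
    (h : k ∉ inner.map Prod.fst) : pvOpt lang inner k = [] := by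
  have hfind : inner.find? (fun p => p.1 == k) = none := by
    apply List.find?_eq_none.mpr
    intro p hp
    simp only [beq_iff_eq]
    intro he
    exact h (he ▸ List.mem_map_of_mem hp)
  simp [pvOpt, PySem.Dict.get?, hfind]

theorem pvOpt_cons_self (lang k v : String) (rest : List (String × String))
    (_h : k ∉ rest.map Prod.fst) : pvOpt lang ((k, v) :: rest) k = [(lang, v)] := by
  simp [pvOpt, PySem.Dict.get?_mk_cons]

theorem pvOpt_cons_ne (lang k v x : String) (rest : List (String × String)) (h : x ≠ k) :
    pvOpt lang ((k, v) :: rest) x = pvOpt lang rest x := by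
  have hb : (k == x) = false := by simp [Ne.symm h]
  simp [pvOpt, PySem.Dict.get?_mk_cons, hb]

theorem pvNewK_acc : ∀ (l ks acc : List String),
    pvNewK ks acc l = acc ++ pvNewK (ks ++ acc) [] l := by
  intro l
  induction l with
  | nil => intro ks acc; simp [pvNewK]
  | cons x t ih =>
    intro ks acc
    by_cases hx : x ∈ ks ∨ x ∈ acc
    · have hx' : x ∈ ks ++ acc ∨ x ∈ ([] : List String) := by
        simpa using hx
      simp only [pvNewK, List.foldl_cons, if_pos hx, if_pos hx']
      exact ih ks acc
    · have hx' : ¬ (x ∈ ks ++ acc ∨ x ∈ ([] : List String)) := by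
        simpa using hx
      simp only [pvNewK, List.foldl_cons, if_neg hx, if_neg hx', List.nil_append]
      have h1 := ih ks (acc ++ [x])
      have h2 := ih (ks ++ acc) [x]
      simp only [pvNewK] at h1 h2 ⊢
      rw [h1, h2]
      simp [List.append_assoc]

theorem mem_pvNewK (ks : List String) : ∀ (l acc : List String) (x : String),
    x ∈ pvNewK ks acc l → x ∈ acc ∨ (x ∈ l ∧ x ∉ ks) := by
  intro l
  induction l with
  | nil => intro acc x hx; exact Or.inl hx
  | cons y t ih =>
    intro acc x hx
    by_cases hy : y ∈ ks ∨ y ∈ acc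
    · simp only [pvNewK, List.foldl_cons, if_pos hy] at hx
      rcases ih acc x hx with h | ⟨h1, h2⟩
      · exact Or.inl h
      · exact Or.inr ⟨List.mem_cons_of_mem _ h1, h2⟩
    · simp only [pvNewK, List.foldl_cons, if_neg hy] at hx
      rcases ih (acc ++ [y]) x hx with h | ⟨h1, h2⟩
      · rcases List.mem_append.mp h with h | h
        · exact Or.inl h
        · have : x = y := by simpa using h
          subst this
          exact Or.inr ⟨List.mem_cons_self, fun hk => hy (Or.inl hk)⟩
      · exact Or.inr ⟨List.mem_cons_of_mem _ h1, h2⟩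

theorem mem_acc_pvNewK (ks : List String) : ∀ (l acc : List String) (x : String),
    x ∈ acc → x ∈ pvNewK ks acc l := by
  intro l
  induction l with
  | nil => intro acc x hx; exact hx
  | cons y t ih =>
    intro acc x hx
    by_cases hy : y ∈ ks ∨ y ∈ acc
    · simp only [pvNewK, List.foldl_cons, if_pos hy]
      exact ih acc x hx
    · simp only [pvNewK, List.foldl_cons, if_neg hy]
      exact ih (acc ++ [y]) x (List.mem_append_left _ hx)

theorem mem_pvNewK_of_mem (ks : List String) : ∀ (l acc : List String) (x : String),
    x ∈ l → x ∉ ks → x ∈ pvNewK ks acc l := by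
  intro l
  induction l with
  | nil => intro acc x hx; exact absurd hx (List.not_mem_nil)
  | cons y t ih =>
    intro acc x hx hks
    rcases List.mem_cons.mp hx with rfl | hx'
    · by_cases hy : x ∈ ks ∨ x ∈ acc
      · have hacc : x ∈ acc := hy.resolve_left hks
        simp only [pvNewK, List.foldl_cons, if_pos hy]
        exact mem_acc_pvNewK ks t acc x hacc
      · simp only [pvNewK, List.foldl_cons, if_neg hy]
        exact mem_acc_pvNewK ks t (acc ++ [x]) x (by simp)
    · by_cases hy : y ∈ ks ∨ y ∈ acc
      · simp only [pvNewK, List.foldl_cons, if_pos hy]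
        exact ih acc x hx' hks
      · simp only [pvNewK, List.foldl_cons, if_neg hy]
        exact ih (acc ++ [y]) x hx' hks

theorem nodup_pvNewK (ks : List String) : ∀ (l acc : List String),
    acc.Nodup → (pvNewK ks acc l).Nodup := by
  intro l
  induction l with
  | nil => intro acc h; exact h
  | cons y t ih =>
    intro acc h
    by_cases hy : y ∈ ks ∨ y ∈ acc
    · simp only [pvNewK, List.foldl_cons, if_pos hy]
      exact ih acc h
    · simp only [pvNewK, List.foldl_cons, if_neg hy]
      refine ih (acc ++ [y]) ?_
      refine List.Nodup.append h (List.nodup_singleton y) ?_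
      intro a ha hb
      have : a = y := by simpa using hb
      exact hy (Or.inr (this ▸ ha))

theorem dedup_eq_pvNewK_aux : ∀ (l acc : List String),
    List.foldl PySem.Set.add acc l = pvNewK [] acc l := by
  intro l
  induction l with
  | nil => intro acc; rfl
  | cons y t ih =>
    intro acc
    have hcond : (PySem.Set.contains acc y = true) ↔ (y ∈ ([] : List String) ∨ y ∈ acc) := by
      simp [PySem.Set.contains]
    by_cases hy : y ∈ ([] : List String) ∨ y ∈ acc
    · have hadd : PySem.Set.add acc y = acc := by
        show (if PySem.Set.contains acc y = true then acc else acc ++ [y]) = acc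
        rw [if_pos (hcond.mpr hy)]
      simp only [pvNewK, List.foldl_cons, if_pos hy, hadd]
      exact ih acc
    · have hadd : PySem.Set.add acc y = acc ++ [y] := by
        simp only [PySem.Set.add, if_neg (by rw [hcond]; exact hy : ¬ PySem.Set.contains acc y = true)]
      simp only [pvNewK, List.foldl_cons, if_neg hy, hadd]
      exact ih (acc ++ [y])

theorem dedup_eq_pvNewK (l : List String) : PySem.List.dedup l = pvNewK [] [] l := by
  simpa [PySem.List.dedup, PySem.Set.ofList, PySem.Set.empty] using dedup_eq_pvNewK_aux l []

theorem pvOpt_fst (lang : String) (inner : List (String × String)) (k : String)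
    (q : String × String) (hq : q ∈ pvOpt lang inner k) : q.1 = lang := by
  cases h : (PySem.Dict.mk inner).get? k <;> simp [pvOpt, h] at hq
  rw [hq]

theorem innerStep_items (lang : String) : ∀ (inner : List (String × String))
    (merged : PySem.Dict String (List (String × String))),
    merged.keys.Nodup → (inner.map Prod.fst).Nodup →
    (∀ p ∈ merged.items, p.1 ∈ inner.map Prod.fst → ∀ q ∈ p.2, q.1 ≠ lang) →
    (inner.foldl (fun m kv => pvInsertEntry m lang kv) merged).items
      = merged.items.map (fun p => (p.1, p.2 ++ pvOpt lang inner p.1))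
        ++ (pvNewK merged.keys [] (inner.map Prod.fst)).map (fun k => (k, pvOpt lang inner k)) := by
  intro inner
  induction inner with
  | nil =>
    intro merged _ _ _
    have hopt : ∀ k : String, pvOpt lang [] k = [] := by
      intro k; simp [pvOpt, PySem.Dict.get?]
    simp [pvNewK, hopt]
  | cons kv t ih =>
    obtain ⟨k₀, v₀⟩ := kv
    intro merged hnd hinner hlang
    have hinner' : (k₀ :: t.map Prod.fst).Nodup := by simpa using hinner
    have hcons := List.nodup_cons.mp hinner' 
    have hk0t : k₀ ∉ t.map Prod.fst := hcons.1
    have htnd : (t.map Prod.fst).Nodup := hcons.2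
    simp only [List.foldl_cons]
    by_cases hc : merged.contains k₀ = true
    · -- the key is already present: the entry's dict gets (lang, v₀) appended
      have hk0mem : k₀ ∈ merged.keys := (PySem.Dict.contains_iff_mem_keys merged k₀).mp hc
      have hm1 : pvInsertEntry merged lang (k₀, v₀)
          = merged.insert k₀ ((PySem.Dict.insert ⟨merged.getD k₀ []⟩ lang v₀).items) := by
        simp [pvInsertEntry, hc, PySem.Dict.modify]
      have hitems : (pvInsertEntry merged lang (k₀, v₀)).items
          = merged.items.map (fun p => if p.1 = k₀ then (p.1, p.2 ++ [(lang, v₀)]) else p) := by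
        rw [hm1, PySem.Dict.items_insert_of_contains merged _ hc]
        apply List.map_congr_left
        intro p hp
        by_cases hpk : p.1 = k₀
        · have hmem : (k₀, p.2) ∈ merged.items := by
            have hpe : p = (k₀, p.2) := by rw [Prod.ext_iff]; exact ⟨hpk, rfl⟩
            exact hpe ▸ hp
          have hgd : merged.getD k₀ [] = p.2 :=
            PySem.Dict.getD_of_mem_items merged hmem hnd []
          have hlp : ∀ q ∈ p.2, q.1 ≠ lang := fun q hq =>
            hlang p hp (by simp [hpk]) q hq
          have hcl : (PySem.Dict.mk p.2).contains lang = false := by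
            simp only [PySem.Dict.contains, List.any_eq_false]
            intro q hq
            simpa using hlp q hq
          have hit : (PySem.Dict.insert (⟨p.2⟩ : PySem.Dict String String) lang v₀).items
              = p.2 ++ [(lang, v₀)] :=
            PySem.Dict.items_insert_of_not_contains _ _ hcl
          simp only [hgd, hit]
          simp [hpk]
        · simp [hpk]
      have hkeys : (pvInsertEntry merged lang (k₀, v₀)).keys = merged.keys := by
        simp only [PySem.Dict.keys, hitems, List.map_map]
        apply List.map_congr_left
        intro p hp
        by_cases hpk : p.1 = k₀ <;> simp [Function.comp, hpk]
      have hlang' : ∀ p ∈ (pvInsertEntry merged lang (k₀, v₀)).items,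
          p.1 ∈ t.map Prod.fst → ∀ q ∈ p.2, q.1 ≠ lang := by
        rw [hitems]
        intro p hp hmem q hq
        obtain ⟨p₀, hp₀, rfl⟩ := List.mem_map.mp hp
        by_cases hpk : p₀.1 = k₀
        · exact absurd (by simpa [hpk] using hmem) hk0t
        · simp only [if_neg hpk] at hmem hq
          exact hlang p₀ hp₀ (List.mem_cons_of_mem _ hmem) q hq
      have ihres := ih (pvInsertEntry merged lang (k₀, v₀)) (hkeys ▸ hnd) htnd hlang'
      rw [ihres, hitems, hkeys, List.map_map]
      have hnk : pvNewK merged.keys [] (k₀ :: t.map Prod.fst)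
          = pvNewK merged.keys [] (t.map Prod.fst) := by
        simp only [pvNewK, List.foldl_cons, if_pos (Or.inl hk0mem)]
      simp only [List.map_cons]
      rw [hnk]
      congr 1
      · apply List.map_congr_left
        intro p hp
        by_cases hpk : p.1 = k₀
        · have h1 : pvOpt lang t k₀ = [] := pvOpt_eq_nil _ _ _ hk0t
          have h2 : pvOpt lang ((k₀, v₀) :: t) k₀ = [(lang, v₀)] := pvOpt_cons_self lang k₀ v₀ t hk0t
          simp [Function.comp, hpk, h1, h2]
        · simp [Function.comp, hpk, pvOpt_cons_ne lang k₀ v₀ p.1 t hpk]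
      · apply List.map_congr_left
        intro k hk
        have hkne : k ≠ k₀ := by
          rcases mem_pvNewK merged.keys _ _ k hk with h | ⟨_, h2⟩
          · exact absurd h (List.not_mem_nil)
          · intro he; exact h2 (he ▸ hk0mem)
        rw [pvOpt_cons_ne lang k₀ v₀ k t hkne]
    · -- fresh key: a new entry (k₀, [(lang, v₀)]) is appended
      have hk0mem : k₀ ∉ merged.keys := fun hm =>
        by rw [(PySem.Dict.contains_iff_mem_keys merged k₀).mpr hm] at hc; exact hc rfl
      have hcfalse : merged.contains k₀ = false := by
        cases h : merged.contains k₀ with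
        | false => rfl
        | true => exact absurd h hc
      have hm1 : pvInsertEntry merged lang (k₀, v₀) = merged.insert k₀ [(lang, v₀)] := by
        have h1 : ((merged.insert k₀ []).getD k₀ []) = [] :=
          PySem.Dict.getD_insert_self merged k₀ [] []
        have h2 : (PySem.Dict.insert (⟨[]⟩ : PySem.Dict String String) lang v₀).items
            = [(lang, v₀)] := by
          simp [PySem.Dict.insert, PySem.Dict.contains]
        simp [pvInsertEntry, hc, PySem.Dict.modify, h1, h2, PySem.Dict.insert_insert_self]
      have hitems : (pvInsertEntry merged lang (k₀, v₀)).items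
          = merged.items ++ [(k₀, [(lang, v₀)])] := by
        rw [hm1]; exact PySem.Dict.items_insert_of_not_contains merged _ hcfalse
      have hkeys : (pvInsertEntry merged lang (k₀, v₀)).keys = merged.keys ++ [k₀] := by
        simp [PySem.Dict.keys, hitems]
      have hnd1 : (pvInsertEntry merged lang (k₀, v₀)).keys.Nodup := by
        rw [hkeys]
        refine List.Nodup.append hnd (List.nodup_singleton k₀) ?_
        intro a ha hb
        have : a = k₀ := by simpa using hb
        exact hk0mem (this ▸ ha)
      have hlang' : ∀ p ∈ (pvInsertEntry merged lang (k₀, v₀)).items,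
          p.1 ∈ t.map Prod.fst → ∀ q ∈ p.2, q.1 ≠ lang := by
        rw [hitems]
        intro p hp hmem q hq
        rcases List.mem_append.mp hp with h | h
        · exact hlang p h (List.mem_cons_of_mem _ hmem) q hq
        · have hpe : p = (k₀, [(lang, v₀)]) := by simpa using h
          exact absurd (by rw [hpe] at hmem; exact hmem) hk0t
      have ihres := ih (pvInsertEntry merged lang (k₀, v₀)) hnd1 htnd hlang'
      rw [ihres, hitems, hkeys]
      have hnk : pvNewK merged.keys [] (k₀ :: t.map Prod.fst)
          = [k₀] ++ pvNewK (merged.keys ++ [k₀]) [] (t.map Prod.fst) := by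
        have hg : ¬ (k₀ ∈ merged.keys ∨ k₀ ∈ ([] : List String)) := by
          simp [hk0mem]
        simp only [pvNewK, List.foldl_cons, if_neg hg, List.nil_append]
        exact pvNewK_acc (t.map Prod.fst) merged.keys [k₀]
      simp only [List.map_cons]
      rw [hnk]
      simp only [List.map_append, List.map_cons, List.map_nil, List.append_assoc,
        List.singleton_append]
      congr 1
      · apply List.map_congr_left
        intro p hp
        have hpne : p.1 ≠ k₀ := by
          intro he
          exact hk0mem (he ▸ (List.mem_map_of_mem hp : p.1 ∈ merged.keys))
        rw [pvOpt_cons_ne lang k₀ v₀ p.1 t hpne]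
      congr 1
      · have h1 : pvOpt lang t k₀ = [] := pvOpt_eq_nil _ _ _ hk0t
        have h2 : pvOpt lang ((k₀, v₀) :: t) k₀ = [(lang, v₀)] := pvOpt_cons_self lang k₀ v₀ t hk0t
        simp [h1, h2]
      apply List.map_congr_left
      intro k hk
      have hkne : k ≠ k₀ := by
        rcases mem_pvNewK _ _ _ k hk with h | ⟨_, h2⟩
        · exact absurd h (List.not_mem_nil)
        · intro he; exact h2 (List.mem_append_right _ (by simp [he]))
      rw [pvOpt_cons_ne lang k₀ v₀ k t hkne]

theorem outer_items : ∀ (data : List (String × List (String × String)))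
    (merged : PySem.Dict String (List (String × String))),
    merged.keys.Nodup →
    (∀ p ∈ merged.items, ∀ q ∈ p.2, q.1 ∉ data.map Prod.fst) →
    (data.map Prod.fst).Nodup →
    (∀ p ∈ data, (p.2.map Prod.fst).Nodup) →
    (data.foldl (fun merged p => p.2.foldl (fun m kv => pvInsertEntry m p.1 kv) merged) merged).items
      = merged.items.map (fun p => (p.1, p.2 ++ pvCollect data p.1))
        ++ (pvNewK merged.keys [] (data.flatMap (fun p => p.2.map Prod.fst))).map
            (fun k => (k, pvCollect data k)) := by
  intro data
  induction data with
  | nil =>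
    intro merged _ _ _ _
    simp [pvCollect, pvNewK]
  | cons hd rest ih =>
    obtain ⟨lang, inner⟩ := hd
    intro merged hnd hdisj hdata hinner
    have hdata' : (lang :: rest.map Prod.fst).Nodup := by simpa using hdata
    have hlangrest : lang ∉ rest.map Prod.fst := (List.nodup_cons.mp hdata').1
    have hrestnd : (rest.map Prod.fst).Nodup := (List.nodup_cons.mp hdata').2
    simp only [List.foldl_cons]
    have hinn := innerStep_items lang inner merged hnd
      (hinner (lang, inner) List.mem_cons_self)
      (fun p hp _ q hq hql =>
        hdisj p hp q hq (by simp only [List.map_cons]; exact hql ▸ List.mem_cons_self))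
    have hkeys1 : (inner.foldl (fun m kv => pvInsertEntry m lang kv) merged).keys
        = merged.keys ++ pvNewK merged.keys [] (inner.map Prod.fst) := by
      simp only [PySem.Dict.keys, hinn, List.map_append, List.map_map]
      congr 1
      exact (List.map_congr_left fun k _ => rfl).trans (List.map_id _)
    have hnd1 : (inner.foldl (fun m kv => pvInsertEntry m lang kv) merged).keys.Nodup := by
      rw [hkeys1]
      refine List.Nodup.append hnd (nodup_pvNewK _ _ _ List.nodup_nil) ?_
      intro a ha hb
      rcases mem_pvNewK _ _ _ a hb with h | ⟨_, h2⟩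
      · exact absurd h (List.not_mem_nil)
      · exact h2 ha
    have hdisj1 : ∀ p ∈ (inner.foldl (fun m kv => pvInsertEntry m lang kv) merged).items,
        ∀ q ∈ p.2, q.1 ∉ rest.map Prod.fst := by
      rw [hinn]
      intro p hp q hq
      rcases List.mem_append.mp hp with h | h
      · obtain ⟨p₀, hp₀, rfl⟩ := List.mem_map.mp h
        rcases List.mem_append.mp hq with hq1 | hq2
        · intro hm
          exact hdisj p₀ hp₀ q hq1 (by simp only [List.map_cons]; exact List.mem_cons_of_mem _ hm)
        · rw [pvOpt_fst lang inner p₀.1 q hq2]; exact hlangrest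
      · obtain ⟨k, _, rfl⟩ := List.mem_map.mp h
        rw [pvOpt_fst lang inner k q hq]; exact hlangrest
    have ihres := ih (inner.foldl (fun m kv => pvInsertEntry m lang kv) merged)
      hnd1 hdisj1 hrestnd (fun p hp => hinner p (List.mem_cons_of_mem _ hp))
    rw [ihres, hinn, hkeys1]
    simp only [List.flatMap_cons]
    have hsplit : pvNewK merged.keys []
          ((inner.map Prod.fst) ++ rest.flatMap (fun p => p.2.map Prod.fst))
        = pvNewK merged.keys [] (inner.map Prod.fst)
          ++ pvNewK (merged.keys ++ pvNewK merged.keys [] (inner.map Prod.fst)) []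
              (rest.flatMap (fun p => p.2.map Prod.fst)) := by
      show List.foldl _ _ _ = _
      rw [List.foldl_append]
      exact pvNewK_acc _ merged.keys _
    rw [hsplit]
    simp only [List.map_append, List.map_map, List.append_assoc]
    congr 1
    · apply List.map_congr_left
      intro p _
      simp [Function.comp, pvCollect_cons, List.append_assoc]
    congr 1
    · apply List.map_congr_left
      intro k _
      simp [Function.comp, pvCollect_cons]
    apply List.map_congr_left
    intro k hk
    have hknotinner : k ∉ inner.map Prod.fst := by
      intro hki
      rcases mem_pvNewK _ _ _ k hk with h | ⟨_, h2⟩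
      · exact absurd h (List.not_mem_nil)
      · by_cases hkk : k ∈ merged.keys
        · exact h2 (List.mem_append_left _ hkk)
        · exact h2 (List.mem_append_right _ (mem_pvNewK_of_mem _ _ [] k hki hkk))
    rw [pvCollect_cons, pvOpt_eq_nil _ _ _ hknotinner, List.nil_append]

-- ===== VERDICT (by name: the statement is the Claim_ definition above) =====
theorem merge_language_dicts_spec : Claim_equal_merge_language_dicts := by
  intro data _ hpre
  unfold Spec_merge_language_dicts
  have h := outer_items data PySem.Dict.empty (by simp [PySem.Dict.keys, PySem.Dict.empty])
    (by simp [PySem.Dict.empty]) hpre.1 hpre.2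
  simp only [merge_language_dicts, merge_language_dicts_alt]
  rw [h, dedup_eq_pvNewK]
  simp [PySem.Dict.empty, PySem.Dict.keys, pvCollect]
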